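-- pv_equiv track=rewrite | github.com/aybturk/L3PI | AMAZON/PC10_testable.py | is_best_sellers_text
-- ===== SOURCE A (Python) =====
-- def is_best_sellers_text(text):
--     """
--     Verilen metin içerisinde, Best Sellers (ve yerel karşılıkları) olabileceğine işaret eden anahtar kelimeler aranır.
--     Fransızca için "meilleures ventes" ve "les meilleures ventes" ifadeleri de eklenmiştir.
--     """
--     candidates = [
--         "best sellers",
--         "best seller",
--         "los más vendidos",
--         "bestseller",
--         "bestsellery",
--         "meilleures ventes",
--         "les meilleures ventes"
--     ]
--     text_lower = text.lower()
--     for candidate in candidates: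
--         if candidate in text_lower:
--             return True
--     return False
-- ===== SOURCE B (Python) =====
-- KEYWORDS = (
--     "best sellers",
--     "best seller",
--     "los más vendidos",
--     "bestseller",
--     "bestsellery",
--     "meilleures ventes",
--     "les meilleures ventes",
-- )
--
--
-- def is_best_sellers_text(text):
--     # Single left-to-right scan: at each position of the lowered text, test
--     # whether any keyword starts there, instead of one full substring search
--     # per keyword.
--     t = text.lower()
--     for i in range(len(t) + 1):
--         for k in KEYWORDS:
--             if t.startswith(k, i):
--                 return True
--     return False
-- ===== Notes on version B (the rewrite author's own statement) =====
-- stated objective: alternative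
-- what changed: Replaces seven independent full-text substring searches (one per keyword) by one left-to-right scan over the lowered text that at each position tests whether any keyword starts there.
import Mathlib
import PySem

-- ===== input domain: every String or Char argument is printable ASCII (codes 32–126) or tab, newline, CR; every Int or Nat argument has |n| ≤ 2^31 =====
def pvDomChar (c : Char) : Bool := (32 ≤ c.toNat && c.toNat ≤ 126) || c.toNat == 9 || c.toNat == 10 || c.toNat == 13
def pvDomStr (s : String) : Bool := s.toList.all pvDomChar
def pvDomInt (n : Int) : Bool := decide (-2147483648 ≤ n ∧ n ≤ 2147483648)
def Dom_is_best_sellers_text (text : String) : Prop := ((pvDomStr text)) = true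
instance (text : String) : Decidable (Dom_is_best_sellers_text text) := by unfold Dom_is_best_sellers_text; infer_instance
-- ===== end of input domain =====

-- B replaces A's seven per-keyword full-text substring searches by one left-to-right
-- scan of the lowered text testing all keywords at each position (objective: alternative).

-- ===== PORT A =====
-- the 'candidates' list of A, in order
def pvCandidates : List String :=
  ["best sellers", "best seller", "los más vendidos", "bestseller",
   "bestsellery", "meilleures ventes", "les meilleures ventes"]

-- A's 'for candidate in candidates: if candidate in text_lower: return True'
def pvLoopA (tl : String) : List String → Bool
  | [] => false
  | c :: cs => if PySem.Str.isIn c tl then true else pvLoopA tl cs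

def is_best_sellers_text (text : String) : Bool :=
  pvLoopA (PySem.Str.lower text) pvCandidates

-- ===== PORT B =====
-- B's KEYWORDS tuple
def pvKeywords : List String :=
  ["best sellers", "best seller", "los más vendidos", "bestseller",
   "bestsellery", "meilleures ventes", "les meilleures ventes"]

-- B's scan: 'for i in range(len(t)+1): for k in KEYWORDS: if t.startswith(k, i): return True';
-- t.startswith(k, i) is 'startswith (t.drop i) k', so the i-loop is a recursion over suffixes
def pvScanB : List Char → Bool
  | [] => pvKeywords.any (fun k => PySem.Chars.startswith [] k.toList)
  | c :: rest =>
      pvKeywords.any (fun k => PySem.Chars.startswith (c :: rest) k.toList) || pvScanB rest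

def is_best_sellers_text_alt (text : String) : Bool :=
  pvScanB (PySem.Str.lower text).toList

-- ===== PRECONDITION & SPEC =====
def Spec_is_best_sellers_text (text : String) (out : Bool) : Prop := out = is_best_sellers_text_alt text
instance (text : String) (out : Bool) : Decidable (Spec_is_best_sellers_text text out) := by unfold Spec_is_best_sellers_text; infer_instance

-- ===== CLAIM (what is proved, stated in full; the proofs are below) =====
def Claim_equal_is_best_sellers_text : Prop := ∀ (text : String), Dom_is_best_sellers_text text → Spec_is_best_sellers_text text (is_best_sellers_text text)

-- ===== LEMMAS AND PROOFS =====

-- every keyword is nonempty (so nothing matches at the end-of-text position)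
theorem pvKeywords_ne_nil : ∀ k ∈ pvKeywords, k.toList ≠ [] := by decide

-- B's scan finds a match iff some keyword is a prefix of some suffix
theorem pvScanB_iff (s : List Char) :
    pvScanB s = true ↔ ∃ k ∈ pvKeywords, ∃ j, k.toList <+: s.drop j := by
  induction s with
  | nil =>
      simp only [pvScanB, List.drop_nil]
      constructor
      · intro h; exact absurd h (by decide)
      · rintro ⟨k, hk, j, hpre⟩
        exact absurd (List.prefix_nil.mp hpre) (pvKeywords_ne_nil k hk)
  | cons c rest ih =>
      simp only [pvScanB, Bool.or_eq_true, List.any_eq_true, ih]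
      constructor
      · rintro (⟨k, hk, hsw⟩ | ⟨k, hk, j, hpre⟩)
        · exact ⟨k, hk, 0, (PySem.Chars.startswith_iff _ _).mp hsw⟩
        · exact ⟨k, hk, j + 1, by simpa using hpre⟩
      · rintro ⟨k, hk, j, hpre⟩
        cases j with
        | zero => exact Or.inl ⟨k, hk, (PySem.Chars.startswith_iff _ _).mpr (by simpa using hpre)⟩
        | succ j => exact Or.inr ⟨k, hk, j, by simpa using hpre⟩

-- A's loop over the candidate list is 'any candidate occurs as a substring'
theorem pvLoopA_iff (tl : String) (cs : List String) :
    pvLoopA tl cs = true ↔ ∃ c ∈ cs, PySem.Str.isIn c tl = true := by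
  induction cs with
  | nil => simp [pvLoopA]
  | cons c cs ih =>
      simp only [pvLoopA]
      split_ifs with h
      · exact iff_of_true rfl ⟨c, List.mem_cons_self, h⟩
      · rw [ih]
        constructor
        · rintro ⟨d, hd, hin⟩
          exact ⟨d, List.mem_cons_of_mem _ hd, hin⟩
        · rintro ⟨d, hd, hin⟩
          rcases List.mem_cons.mp hd with rfl | hd
          · exact absurd hin h
          · exact ⟨d, hd, hin⟩

-- one candidate: 'c in tl' ↔ c starts at some position of tl
theorem pvIsIn_iff_exists_drop (c tl : String) :
    PySem.Str.isIn c tl = true ↔ ∃ j, c.toList <+: tl.toList.drop j := by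
  rw [PySem.Str.isIn_iff_infix, ← PySem.Chars.isIn_iff_infix,
      ← PySem.Chars.exists_prefix_drop_iff_isIn]

-- ===== VERDICT (by name: the statement is the Claim_ definition above) =====
theorem is_best_sellers_text_spec : Claim_equal_is_best_sellers_text := by
  intro text _
  unfold Spec_is_best_sellers_text is_best_sellers_text is_best_sellers_text_alt
  refine (Bool.eq_iff_iff.mpr ?_).symm
  rw [pvLoopA_iff, pvScanB_iff]
  exact exists_congr fun c => and_congr_right fun _ => (pvIsIn_iff_exists_drop c _).symm
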